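-- pv_equiv track=rewrite | github.com/ivaylospasov/programming-101 | TasksForCourseApply/abcheck.py | ABCheck
-- ===== SOURCE A (Python) =====
-- def ABCheck(some_string):
--     a_list = [x for x in range(len(some_string)) if some_string[x] == 'a']
--     b_list = [y for y in range(len(some_string)) if some_string[y] == 'b']
--     # A list with positive values of a's and b's indexes
--     sbt_results = [abs(x - y) for x in a_list for y in b_list]
--     # The number of places between a's and b's has to be 4
--     if 4 in sbt_results:
--         return True
--     else:
--         return False
-- ===== SOURCE B (Python) =====
-- def ABCheck(some_string):
--     n = len(some_string)
--     for i, c in enumerate(some_string):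
--         if c == 'a':
--             if i + 4 < n and some_string[i + 4] == 'b':
--                 return True
--             if i >= 4 and some_string[i - 4] == 'b':
--                 return True
--     return False
-- ===== Notes on version B (the rewrite author's own statement) =====
-- stated objective: faster
-- what changed: Single pass over the string checking, for each 'a' at index i, whether position i+4 or i-4 holds a 'b', instead of building both index lists and the full list of all pairwise distances.
import Mathlib
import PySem

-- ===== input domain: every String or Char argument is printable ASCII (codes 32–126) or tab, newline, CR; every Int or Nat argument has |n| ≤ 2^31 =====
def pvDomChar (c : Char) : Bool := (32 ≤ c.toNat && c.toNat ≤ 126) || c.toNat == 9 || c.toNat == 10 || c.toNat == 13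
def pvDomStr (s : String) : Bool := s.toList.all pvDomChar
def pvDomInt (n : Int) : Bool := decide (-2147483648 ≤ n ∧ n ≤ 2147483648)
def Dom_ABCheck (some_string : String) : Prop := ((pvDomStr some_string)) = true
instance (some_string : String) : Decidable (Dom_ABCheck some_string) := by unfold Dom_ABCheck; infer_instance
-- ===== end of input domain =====

-- B replaces A's quadratic all-pairs distance list with a single pass that checks
-- positions i+4 and i-4 for each 'a' (objective: faster, asymptotic).


-- ===== PORT A =====
-- indices produced by range(len(s)) are always in range, so getD is exact here
def ABCheck (some_string : String) : Bool :=
  let cs := some_string.toList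
  let a_list := (List.range cs.length).filter (fun x => cs.getD x ' ' = 'a')
  let b_list := (List.range cs.length).filter (fun y => cs.getD y ' ' = 'b')
  let sbt_results := a_list.flatMap (fun x => b_list.map (fun y => ((x : Int) - (y : Int)).natAbs))
  if 4 ∈ sbt_results then true else false

-- ===== PORT B =====
def ABCheck_alt (some_string : String) : Bool :=
  let cs := some_string.toList
  (List.range cs.length).any (fun i =>
    cs.getD i ' ' = 'a' &&
    ((decide (i + 4 < cs.length) && cs.getD (i + 4) ' ' = 'b') ||
     (decide (4 ≤ i) && cs.getD (i - 4) ' ' = 'b')))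

-- ===== PRECONDITION & SPEC =====
def Spec_ABCheck (some_string : String) (out : Bool) : Prop := out = ABCheck_alt some_string
instance (some_string : String) (out : Bool) : Decidable (Spec_ABCheck some_string out) := by unfold Spec_ABCheck; infer_instance

-- ===== CLAIM (what is proved, stated in full; the proofs are below) =====
def Claim_equal_ABCheck : Prop := ∀ (some_string : String), Dom_ABCheck some_string → Spec_ABCheck some_string (ABCheck some_string)

-- ===== LEMMAS AND PROOFS =====

theorem ABCheck_eq_alt (s : String) : ABCheck s = ABCheck_alt s := by
  rw [Bool.eq_iff_iff]
  unfold ABCheck ABCheck_alt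
  simp [List.mem_flatMap, List.mem_map, List.mem_filter, List.mem_range]
  constructor
  · rintro ⟨x, ⟨hx, hxa⟩, y, ⟨hy, hyb⟩, hv⟩
    have hxy : y = x + 4 ∨ x = y + 4 := by omega
    rcases hxy with h | h
    · exact ⟨x, hx, hxa, Or.inl ⟨by omega, by rw [← h]; exact hyb⟩⟩
    · exact ⟨x, hx, hxa, Or.inr ⟨by omega, by rw [show x - 4 = y by omega]; exact hyb⟩⟩
  · rintro ⟨i, hi, hia, h⟩
    rcases h with ⟨hlt, hb⟩ | ⟨hge, hb⟩
    · exact ⟨i, ⟨hi, hia⟩, i + 4, ⟨hlt, hb⟩, by omega⟩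
    · exact ⟨i, ⟨hi, hia⟩, i - 4, ⟨by omega, hb⟩, by omega⟩

-- ===== VERDICT (by name: the statement is the Claim_ definition above) =====
theorem ABCheck_spec : Claim_equal_ABCheck := by
  intro s _
  unfold Spec_ABCheck
  exact ABCheck_eq_alt s
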